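-- pv_equiv track=rewrite | github.com/gmthu66/AbAgIPA | SabDab/get_SabDabData.py | check_duplic_dict
-- ===== SOURCE A (Python) =====
-- def check_duplic_dict(info_dict):
--     def check_intersection(lst):
--         for i in range(len(lst)):
--             for j in range(i + 1, len(lst)):
--                 if set(lst[i]) & set(lst[j]):
--                     return True
--         return False
--     ll = []
--     for k_ in info_dict.keys():
--         ll.append(list(info_dict[k_].keys()))
--     return check_intersection(ll)
-- ===== SOURCE B (Python) =====
-- def check_duplic_dict(info_dict):
--     combined = []
--     for sub in info_dict.values():
--         combined.extend(sub.keys())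
--     return len(combined) != len(set(combined))
-- ===== Notes on version B (the rewrite author's own statement) =====
-- stated objective: simpler
-- what changed: Replaces the quadratic pairwise set-intersection scan over all sub-dicts with one flattening pass over all keys followed by a single total-count vs distinct-count comparison (keys are unique within each dict, so any cross-dict shared key makes the counts differ).
import Mathlib
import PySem

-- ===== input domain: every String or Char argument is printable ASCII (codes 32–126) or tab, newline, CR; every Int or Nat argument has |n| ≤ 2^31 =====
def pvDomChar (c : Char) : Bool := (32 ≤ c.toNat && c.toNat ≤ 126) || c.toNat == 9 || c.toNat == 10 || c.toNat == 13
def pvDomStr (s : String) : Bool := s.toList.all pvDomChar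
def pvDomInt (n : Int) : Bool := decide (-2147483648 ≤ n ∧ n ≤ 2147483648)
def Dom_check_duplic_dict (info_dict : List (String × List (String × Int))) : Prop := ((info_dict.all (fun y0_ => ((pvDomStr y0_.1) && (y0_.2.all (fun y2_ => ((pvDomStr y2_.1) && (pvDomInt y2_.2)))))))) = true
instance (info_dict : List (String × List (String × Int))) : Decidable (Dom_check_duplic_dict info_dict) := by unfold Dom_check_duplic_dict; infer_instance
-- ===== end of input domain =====

-- B replaces the pairwise set-intersection scan by one flatten pass plus a total-count vs
-- distinct-count comparison (simpler); equivalence holds on canonical dict inputs (Pre_).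


-- ===== PORT A =====
-- set(lst[i]) & set(lst[j]) is nonempty  ⟺  some element of lst[i] occurs in lst[j]
def pvShare (x y : List String) : Bool := x.any (fun k => y.contains k)

-- the nested index loop 'for i … for j in range(i+1,…)' with early return, as structural recursion
def pvCheckIntersection : List (List String) → Bool
  | [] => false
  | x :: rest => rest.any (fun y => pvShare x y) || pvCheckIntersection rest

def check_duplic_dict (info_dict : List (String × List (String × Int))) : Bool :=
  -- ll = [list(info_dict[k_].keys()) for k_ in info_dict.keys()]
  let ll := info_dict.map (fun p => p.2.map Prod.fst)
  pvCheckIntersection ll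

-- ===== PORT B =====
def check_duplic_dict_alt (info_dict : List (String × List (String × Int))) : Bool :=
  let combined := info_dict.foldl (fun acc p => acc ++ p.2.map Prod.fst) []
  decide (combined.length ≠ (PySem.Set.ofList combined).length)

-- ===== PRECONDITION & SPEC =====
-- Pre_ admits exactly the canonical association-list encodings of a Python dict of dicts:
-- no duplicate keys at the top level and none inside any sub-dict (a Python dict cannot
-- contain duplicate keys, so every input A actually receives satisfies this).
def Pre_check_duplic_dict (info_dict : List (String × List (String × Int))) : Prop :=
  (info_dict.map Prod.fst).Nodup ∧ ∀ p ∈ info_dict, (p.2.map Prod.fst).Nodup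
instance (info_dict : List (String × List (String × Int))) : Decidable (Pre_check_duplic_dict info_dict) := by unfold Pre_check_duplic_dict; infer_instance

def pvWitness_check_duplic_dict : (List (String × List (String × Int))) :=
  [("a", [("x", 1), ("y", 2)]), ("b", [("x", 3)])]

def Spec_check_duplic_dict (info_dict : List (String × List (String × Int))) (out : Bool) : Prop := out = check_duplic_dict_alt info_dict
instance (info_dict : List (String × List (String × Int))) (out : Bool) : Decidable (Spec_check_duplic_dict info_dict out) := by unfold Spec_check_duplic_dict; infer_instance

-- ===== CLAIM (what is proved, stated in full; the proofs are below) =====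
def Claim_equal_check_duplic_dict : Prop := ∀ (info_dict : List (String × List (String × Int))), Dom_check_duplic_dict info_dict → Pre_check_duplic_dict info_dict → Spec_check_duplic_dict info_dict (check_duplic_dict info_dict)

-- ===== LEMMAS AND PROOFS =====

-- the foldl-append accumulation is flatten of the mapped keys
theorem pv_foldl_append (l : List (String × List (String × Int))) (acc : List String) :
    l.foldl (fun acc p => acc ++ p.2.map Prod.fst) acc
      = acc ++ (l.map (fun p => p.2.map Prod.fst)).flatten := by
  induction l generalizing acc with
  | nil => simp
  | cons p l ih => simp [List.foldl_cons, ih, List.append_assoc]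

-- Set.ofList is a sublist of its argument
theorem pv_ofList_sublist {α : Type} [BEq α] [LawfulBEq α] (l : List α) :
    (PySem.Set.ofList l).Sublist l := by
  have h : ∀ (l s : List α), ∃ t, l.foldl PySem.Set.add s = s ++ t ∧ t.Sublist l := by
    intro l
    induction l with
    | nil => intro s; exact ⟨[], by simp⟩
    | cons x l ih =>
      intro s
      by_cases hx : x ∈ s
      · obtain ⟨t, ht, hs⟩ := ih s
        refine ⟨t, ?_, hs.trans (List.sublist_cons_self x l)⟩
        simp only [List.foldl_cons, PySem.Set.add]
        simpa [hx] using ht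
      · obtain ⟨t, ht, hs⟩ := ih (s ++ [x])
        refine ⟨x :: t, ?_, List.Sublist.cons₂ x hs⟩
        simp only [List.foldl_cons, PySem.Set.add]
        simpa [hx] using ht
  obtain ⟨t, ht, hs⟩ := h l []
  rw [List.nil_append] at ht
  have he : PySem.Set.ofList l = t := by rw [PySem.Set.ofList_eq_foldl, ht]
  exact he ▸ hs

-- len(combined) == len(set(combined))  ⟺  combined has no duplicates
theorem pv_len_ofList_iff (l : List String) :
    (PySem.Set.ofList l).length = l.length ↔ l.Nodup := by
  constructor
  · intro h
    have he := (pv_ofList_sublist l).eq_of_length h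
    exact he ▸ PySem.Set.nodup_ofList l
  · intro h
    have hle : l.length ≤ (PySem.Set.ofList l).length := by
      refine (h.subperm ?_).length_le
      intro x hx
      rw [PySem.Set.mem_ofList]
      exact hx
    exact le_antisymm ((pv_ofList_sublist l).length_le) hle

theorem pv_share_iff (x y : List String) : pvShare x y = true ↔ ∃ k ∈ x, k ∈ y := by
  simp [pvShare]

-- A's pairwise intersection check finds a duplicate in the flattened keys, given
-- that each block is itself duplicate-free
theorem pv_checkInter_iff (ll : List (List String)) (h : ∀ x ∈ ll, x.Nodup) :
    pvCheckIntersection ll = true ↔ ¬ ll.flatten.Nodup := by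
  induction ll with
  | nil => simp [pvCheckIntersection]
  | cons x rest ih =>
    have hx : x.Nodup := h x (by simp)
    have hrest := ih (fun y hy => h y (by simp [hy]))
    rw [show (x :: rest).flatten = x ++ rest.flatten from rfl, List.nodup_append]
    simp only [pvCheckIntersection, Bool.or_eq_true, List.any_eq_true, hrest]
    constructor
    · rintro (⟨y, hy, hsh⟩ | hdup)
      · rintro ⟨-, hfl, hdisj⟩
        obtain ⟨k, hkx, hky⟩ := (pv_share_iff x y).1 hsh
        exact hdisj k hkx k (List.mem_flatten.2 ⟨y, hy, hky⟩) rfl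
      · rintro ⟨-, hfl, -⟩; exact hdup hfl
    · intro hnot
      by_cases hdup : rest.flatten.Nodup
      · left
        have hdisj : ¬ ∀ a ∈ x, ∀ b ∈ rest.flatten, a ≠ b := fun hd => hnot ⟨hx, hdup, hd⟩
        push Not at hdisj
        obtain ⟨k, hkx, b, hbf, hkb⟩ := hdisj
        subst hkb
        obtain ⟨y, hy, hky⟩ := List.mem_flatten.1 hbf
        exact ⟨y, hy, (pv_share_iff x y).2 ⟨k, hkx, hky⟩⟩
      · right; exact hdup

-- ===== VERDICT (by name: the statement is the Claim_ definition above) =====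
theorem check_duplic_dict_spec : Claim_equal_check_duplic_dict := by
  intro info_dict _ hpre
  unfold Spec_check_duplic_dict check_duplic_dict check_duplic_dict_alt
  rw [pv_foldl_append, List.nil_append]
  set fl := (info_dict.map (fun p => p.2.map Prod.fst)).flatten with hfl
  have hblocks : ∀ x ∈ info_dict.map (fun p => p.2.map Prod.fst), x.Nodup := by
    intro x hx
    obtain ⟨p, hp, rfl⟩ := List.mem_map.1 hx
    exact hpre.2 p hp
  have hA := pv_checkInter_iff _ hblocks
  have hB : (decide (fl.length ≠ (PySem.Set.ofList fl).length)) = true ↔ ¬ fl.Nodup := by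
    rw [decide_eq_true_iff]
    exact not_congr (eq_comm.trans (pv_len_ofList_iff fl))
  rw [Bool.eq_iff_iff, hA, hB]
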